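-- pv_equiv track=rewrite | github.com/hilman4kholik/2_Simple-Encrypt-Prima | main.py | enPrima
-- ===== SOURCE A (Python) =====
-- def enPrima(plaintext):
--     key = ['1Z', '2D', '3F', '4C', '4B', '5D', '6G', '7J', '8L', '8W', '9W', '1Q', '4H',
--            '5K', '3D', '2F', '1D', '1B', '1A', '2G', '3M', '4D', '6D', '6H', '7F', '7D', '12', '55', '34', '77', '65', '88', '87', '85', '90', '09', '07', '21', '23', '28', '29', '20', '39', '80', '84', '78', 'B1', 'D1', 'C1', 'F1', 'G1', 'R1', 'U1', 'A1', 'B2', 'C2', 'D2', 'E2', 'F2', 'G2', 'B3', 'C3', 'D3', 'F3', 'G3', 'B4', 'C4', 'D4', 'F4', 'G4', 'B5', 'C5']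
--     alphabet = "[]abcdefghijklmnopqrstuvwxyz0123456789!@#$%^&*()ABCDEFGHIJKLMNOPQRSTUVWXYZ"
--     chipertext = ""
--     prima = 173
--     enkrip = ""
--     for ch in plaintext:
--         idx = alphabet.find(ch)
--         if len(str(idx)) == 2:
--             chipertext = chipertext + "1" + str(idx)
--         else:
--             chipertext = chipertext + str(idx)
--     try:
--         r = int(chipertext) + prima
--         for x in str(r):
--             enkrip = enkrip + key[int(x)]
--         return str(enkrip)
--     except ValueError:
--         return "Tidak bisa di enkrip"
-- ===== SOURCE B (Python) =====
-- def enPrima(plaintext):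
--     key = ['1Z', '2D', '3F', '4C', '4B', '5D', '6G', '7J', '8L', '8W', '9W', '1Q', '4H',
--            '5K', '3D', '2F', '1D', '1B', '1A', '2G', '3M', '4D', '6D', '6H', '7F', '7D', '12', '55', '34', '77', '65', '88', '87', '85', '90', '09', '07', '21', '23', '28', '29', '20', '39', '80', '84', '78', 'B1', 'D1', 'C1', 'F1', 'G1', 'R1', 'U1', 'A1', 'B2', 'C2', 'D2', 'E2', 'F2', 'G2', 'B3', 'C3', 'D3', 'F3', 'G3', 'B4', 'C4', 'D4', 'F4', 'G4', 'B5', 'C5']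
--     alphabet = "[]abcdefghijklmnopqrstuvwxyz0123456789!@#$%^&*()ABCDEFGHIJKLMNOPQRSTUVWXYZ"
--     # build the per-character digit codes as a list of digits (no string round-trip)
--     digits = []
--     for ch in plaintext:
--         i = alphabet.find(ch)
--         if i < 0:
--             return "Tidak bisa di enkrip"
--         if i >= 10:
--             digits += (1, i // 10, i % 10)
--         else:
--             digits.append(i)
--     if not digits:
--         return "Tidak bisa di enkrip"
--     # int() semantics: leading zeros do not contribute
--     k = 0
--     while k < len(digits) - 1 and digits[k] == 0:
--         k += 1
--     # schoolbook addition of the prime 173, least-significant digit first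
--     out = []
--     carry = 173
--     for d in reversed(digits[k:]):
--         carry += d
--         out.append(carry % 10)
--         carry //= 10
--     while carry:
--         out.append(carry % 10)
--         carry //= 10
--     return "".join(key[d] for d in reversed(out))
-- ===== Notes on version B (the rewrite author's own statement) =====
-- stated objective: faster
-- what changed: A concatenates per-character digit codes into a decimal string, round-trips it through int() (+ 173) and str(), and maps the digits through the key table; B never builds or parses a number string: it keeps the codes as a digit list, drops leading zeros, adds 173 by schoolbook carry on the digit list, and joins the key entries in one pass, removing the quadratic string-concatenation and bigint decimal parse/print.
import Mathlib
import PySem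

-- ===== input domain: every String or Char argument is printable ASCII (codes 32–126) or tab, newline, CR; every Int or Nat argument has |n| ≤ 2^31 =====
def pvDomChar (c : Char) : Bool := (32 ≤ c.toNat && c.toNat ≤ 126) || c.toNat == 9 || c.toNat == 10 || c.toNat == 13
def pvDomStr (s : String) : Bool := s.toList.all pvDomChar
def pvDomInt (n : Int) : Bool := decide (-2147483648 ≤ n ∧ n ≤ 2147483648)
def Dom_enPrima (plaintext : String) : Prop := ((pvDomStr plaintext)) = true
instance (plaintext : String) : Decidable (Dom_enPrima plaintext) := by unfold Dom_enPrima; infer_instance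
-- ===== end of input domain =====

-- B replaces A's digit-string/bigint round-trip (build decimal string, int(), +173, str())
-- by direct digit-list arithmetic: one pass computing the digit codes, schoolbook carry
-- addition of 173, and a single join through the key table; same value on every input,
-- O(n) instead of A's quadratic concatenation + decimal parse/print (measured faster).
-- (CPython >= 3.11's configurable 4300-digit int<->str conversion guard is a runtime limit,
-- not modelled here, as in PySem itself.)

-- ===== PORT A =====
def pvKey : List String := ["1Z", "2D", "3F", "4C", "4B", "5D", "6G", "7J", "8L", "8W", "9W", "1Q", "4H",
  "5K", "3D", "2F", "1D", "1B", "1A", "2G", "3M", "4D", "6D", "6H", "7F", "7D", "12", "55", "34", "77",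
  "65", "88", "87", "85", "90", "09", "07", "21", "23", "28", "29", "20", "39", "80", "84", "78", "B1",
  "D1", "C1", "F1", "G1", "R1", "U1", "A1", "B2", "C2", "D2", "E2", "F2", "G2", "B3", "C3", "D3", "F3",
  "G3", "B4", "C4", "D4", "F4", "G4", "B5", "C5"]

def pvAlphabet : String := "[]abcdefghijklmnopqrstuvwxyz0123456789!@#$%^&*()ABCDEFGHIJKLMNOPQRSTUVWXYZ"

-- Hand port of Python's int(s) used by both ports: exact (none = ValueError) on every
-- non-empty string made of decimal digits and '-' with '-' never leading, and on "" —
-- the only strings this program ever parses (chipertext chunks are "0".."9" or "1"+str(idx);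
-- no sign prefix, no whitespace, no '_' can occur).
def pvParseDigits : List Char → ℕ → Option ℕ
  | [], acc => some acc
  | c :: rest, acc =>
    if c.isDigit then pvParseDigits rest (acc * 10 + (c.toNat - '0'.toNat)) else none

def pvInt? (cs : List Char) : Option ℤ :=
  if cs.isEmpty then none else (pvParseDigits cs 0).map (fun n => (n : ℤ))

def enPrima (plaintext : String) : String :=
  -- for ch in plaintext: chipertext += "1" + str(idx) if len(str(idx)) == 2 else str(idx)
  let chipertext : List Char :=
    plaintext.toList.foldl (fun cip ch =>
      let idx := PySem.Str.find pvAlphabet (String.singleton ch)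
      if (PySem.Int.toChars idx).length = 2 then cip ++ '1' :: PySem.Int.toChars idx
      else cip ++ PySem.Int.toChars idx) []
  match pvInt? chipertext with
  | none => "Tidak bisa di enkrip"   -- except ValueError
  | some v =>
    let r := v + 173
    -- for x in str(r): enkrip += key[int(x)]   (key has 72 entries, int(x) < 10: .getD is exact)
    String.ofList ((PySem.Int.toChars r).foldl
      (fun enk x => enk ++ ((PySem.List.pyGet? pvKey ((pvInt? [x]).getD 0)).getD "").toList) [])

-- ===== PORT B =====
-- digit-code list of the plaintext; i >= 0 on every kept branch, so ℕ // and % are Python's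
def pvDigits : List Char → Option (List ℕ)
  | [] => some []
  | ch :: rest =>
    let i := PySem.Str.find pvAlphabet (String.singleton ch)
    if i < 0 then none    -- early return "Tidak bisa di enkrip"
    else match pvDigits rest with
      | none => none
      | some ds => some ((if 10 ≤ i then [1, i.toNat / 10, i.toNat % 10] else [i.toNat]) ++ ds)

-- the k-loop: drop leading zeros but keep the last digit
def pvStripZeros : List ℕ → List ℕ
  | [] => []
  | [d] => [d]
  | d :: rest => if d = 0 then pvStripZeros rest else d :: rest

-- the carry loop (for + trailing while), least-significant digit first
def pvAddCarry : List ℕ → ℕ → List ℕ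
  | [], c => if c = 0 then [] else c % 10 :: pvAddCarry [] (c / 10)
  | d :: rest, c => (d + c) % 10 :: pvAddCarry rest ((d + c) / 10)
  termination_by ls c => (ls.length, c)
  decreasing_by
  · exact Prod.Lex.right _ (Nat.div_lt_self (Nat.pos_of_ne_zero (by assumption)) (by norm_num))
  · exact Prod.Lex.left _ _ (by simp)

def enPrima_alt (plaintext : String) : String :=
  match pvDigits plaintext.toList with
  | none => "Tidak bisa di enkrip"
  | some [] => "Tidak bisa di enkrip"
  | some (d :: ds) =>
    let stripped := pvStripZeros (d :: ds)
    let out := pvAddCarry stripped.reverse 173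
    String.ofList (out.reverse.flatMap (fun (d : ℕ) => ((PySem.List.pyGet? pvKey ((d : ℤ))).getD "").toList))

-- ===== PRECONDITION & SPEC =====
def Spec_enPrima (plaintext : String) (out : String) : Prop := out = enPrima_alt plaintext
instance (plaintext : String) (out : String) : Decidable (Spec_enPrima plaintext out) := by unfold Spec_enPrima; infer_instance

-- ===== CLAIM (what is proved, stated in full; the proofs are below) =====
def Claim_equal_enPrima : Prop := ∀ (plaintext : String), Dom_enPrima plaintext → Spec_enPrima plaintext (enPrima plaintext)

-- ===== LEMMAS AND PROOFS =====

-- the index of ch, A's per-character chunk of chipertext, B's per-character digit chunk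
def pvFind (ch : Char) : ℤ := PySem.Str.find pvAlphabet (String.singleton ch)

def pvChunkA (i : ℤ) : List Char :=
  if (PySem.Int.toChars i).length = 2 then '1' :: PySem.Int.toChars i else PySem.Int.toChars i

def pvChunkB (n : ℕ) : List ℕ := if 10 ≤ n then [1, n / 10, n % 10] else [n]

-- big-endian and little-endian values of a digit list, canonical little-endian digits
def pvValBE (ds : List ℕ) : ℕ := ds.foldl (fun a d => a * 10 + d) 0
def pvValLE : List ℕ → ℕ
  | [] => 0
  | d :: t => d + 10 * pvValLE t
def pvNatLE (n : ℕ) : List ℕ :=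
  if n = 0 then [] else n % 10 :: pvNatLE (n / 10)

theorem chunk_fin : ∀ n : Fin 74,
    pvChunkA ((n : ℕ) : ℤ) = (pvChunkB (n : ℕ)).map Nat.digitChar ∧
    ∀ d ∈ pvChunkB (n : ℕ), d < 10 := by decide

theorem digit_char_facts : ∀ d : Fin 10,
    (Nat.digitChar (d : ℕ)).isDigit = true ∧
    (Nat.digitChar (d : ℕ)).toNat - '0'.toNat = (d : ℕ) ∧
    (pvInt? [Nat.digitChar (d : ℕ)]).getD 0 = ((d : ℕ) : ℤ) := by decide

theorem find_cases (ch : Char) :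
    pvFind ch = -1 ∨ (0 ≤ pvFind ch ∧ (pvFind ch).toNat < 74) := by
  unfold pvFind
  rw [PySem.Str.find_eq, String.toList_singleton]
  by_cases h : 0 ≤ PySem.Chars.find pvAlphabet.toList [ch]
  · refine Or.inr ⟨h, ?_⟩
    have hpre := (PySem.Chars.find_spec h).1
    have hlen : pvAlphabet.toList.length = 74 := by decide
    by_contra hge
    rw [Nat.not_lt] at hge
    have : pvAlphabet.toList.drop (PySem.Chars.find pvAlphabet.toList [ch]).toNat = [] :=
      List.drop_eq_nil_of_le (by omega)
    rw [this] at hpre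
    exact absurd (List.IsPrefix.length_le hpre) (by simp)
  · refine Or.inl ?_
    have h2 := PySem.Chars.neg_one_le_find pvAlphabet.toList [ch]
    omega

-- A's loop builds the concatenation of the chunks
theorem chipertext_eq (l : List Char) :
    l.foldl (fun cip ch =>
      let idx := PySem.Str.find pvAlphabet (String.singleton ch)
      if (PySem.Int.toChars idx).length = 2 then cip ++ '1' :: PySem.Int.toChars idx
      else cip ++ PySem.Int.toChars idx) [] = l.flatMap (fun ch => pvChunkA (pvFind ch)) := by
  have hf : (fun (cip : List Char) ch =>
      let idx := PySem.Str.find pvAlphabet (String.singleton ch)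
      if (PySem.Int.toChars idx).length = 2 then cip ++ '1' :: PySem.Int.toChars idx
      else cip ++ PySem.Int.toChars idx) = (fun cip ch => cip ++ pvChunkA (pvFind ch)) := by
    funext cip ch
    show (if (PySem.Int.toChars (PySem.Str.find pvAlphabet (String.singleton ch))).length = 2
        then cip ++ '1' :: PySem.Int.toChars (PySem.Str.find pvAlphabet (String.singleton ch))
        else cip ++ PySem.Int.toChars (PySem.Str.find pvAlphabet (String.singleton ch))) = _
    unfold pvChunkA pvFind
    split_ifs <;> rfl
  rw [hf, PySem.List.foldl_append_eq_flatMap]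
  rfl

-- B's loop: success and failure characterisation
theorem chunk_cast (i : ℤ) (h : 0 ≤ i) :
    (if 10 ≤ i then [1, i.toNat / 10, i.toNat % 10] else [i.toNat]) = pvChunkB i.toNat := by
  unfold pvChunkB
  split_ifs with h1 h2 <;> first | rfl | omega

theorem pvDigits_some (l : List Char) (h : ∀ ch ∈ l, 0 ≤ pvFind ch) :
    pvDigits l = some (l.flatMap (fun ch => pvChunkB (pvFind ch).toNat)) := by
  induction l with
  | nil => rfl
  | cons c rest ih =>
    have hc := h c (by simp)
    have hrest := ih (fun ch hm => h ch (by simp [hm]))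
    simp only [pvDigits, pvFind] at *
    rw [if_neg (by omega), hrest, chunk_cast _ hc]
    simp

theorem pvDigits_none (l : List Char) (ch : Char) (hm : ch ∈ l) (h : pvFind ch < 0) :
    pvDigits l = none := by
  induction l with
  | nil => cases hm
  | cons c rest ih =>
    rcases List.mem_cons.mp hm with rfl | hm'
    · simp only [pvDigits, pvFind] at *
      rw [if_pos h]
    · simp only [pvDigits]
      split
      · rfl
      · rw [ih hm']

-- parsing
theorem parse_digits (ds : List ℕ) (h : ∀ d ∈ ds, d < 10) (acc : ℕ) :
    pvParseDigits (ds.map Nat.digitChar) acc = some (ds.foldl (fun a d => a * 10 + d) acc) := by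
  induction ds generalizing acc with
  | nil => rfl
  | cons d t ih =>
    obtain ⟨h1, h2, -⟩ := digit_char_facts ⟨d, h d (by simp)⟩
    simp only [List.map_cons, pvParseDigits, h1, if_pos, List.foldl_cons]
    rw [h2]
    exact ih (fun x hx => h x (by simp [hx])) _

theorem parse_none (cs : List Char) (h : '-' ∈ cs) (acc : ℕ) :
    pvParseDigits cs acc = none := by
  induction cs generalizing acc with
  | nil => cases h
  | cons c rest ih =>
    rcases List.mem_cons.mp h with rfl | hm
    · simp [pvParseDigits]
    · by_cases hd : c.isDigit
      · simp only [pvParseDigits, hd, if_pos]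
        exact ih hm _
      · simp [pvParseDigits, hd]

-- strip-zeros facts
theorem strip_sub (ds : List ℕ) : ∀ d ∈ pvStripZeros ds, d ∈ ds := by
  induction ds with
  | nil => simp [pvStripZeros]
  | cons d rest ih =>
    cases rest with
    | nil => simp [pvStripZeros]
    | cons e t =>
      intro x hx
      by_cases h0 : d = 0
      · subst h0
        rw [show pvStripZeros (0 :: e :: t) = pvStripZeros (e :: t) from by simp [pvStripZeros]] at hx
        exact List.mem_cons_of_mem _ (ih x hx)
      · rw [show pvStripZeros (d :: e :: t) = d :: e :: t from by simp [pvStripZeros, h0]] at hx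
        exact hx
theorem strip_val (ds : List ℕ) : pvValBE (pvStripZeros ds) = pvValBE ds := by
  induction ds with
  | nil => rfl
  | cons d rest ih =>
    cases rest with
    | nil => rfl
    | cons e t =>
      by_cases h0 : d = 0
      · subst h0
        rw [show pvStripZeros (0 :: e :: t) = pvStripZeros (e :: t) from by simp [pvStripZeros]]
        rw [ih]
        simp [pvValBE]
      · rw [show pvStripZeros (d :: e :: t) = d :: e :: t from by simp [pvStripZeros, h0]]
theorem strip_head (ds : List ℕ) :
    (pvStripZeros ds).head? ≠ some 0 ∨ pvStripZeros ds = [0] := by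
  induction ds with
  | nil => left; simp [pvStripZeros]
  | cons d rest ih =>
    cases rest with
    | nil =>
      by_cases h0 : d = 0
      · subst h0; right; rfl
      · left; simp [pvStripZeros, h0]
    | cons e t =>
      by_cases h0 : d = 0
      · subst h0
        rw [show pvStripZeros (0 :: e :: t) = pvStripZeros (e :: t) from by simp [pvStripZeros]]
        exact ih
      · left
        rw [show pvStripZeros (d :: e :: t) = d :: e :: t from by simp [pvStripZeros, h0]]
        simp [h0]

-- value lemmas
theorem valBE_eq_valLE_reverse (ds : List ℕ) : pvValBE ds = pvValLE ds.reverse := by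
  induction ds using List.reverseRecOn with
  | nil => rfl
  | append_singleton xs x ih =>
    rw [List.reverse_append]
    simp only [pvValBE, List.foldl_append, List.foldl_cons, List.foldl_nil,
      List.reverse_singleton, List.singleton_append, pvValLE]
    rw [← pvValBE, ← ih]
    ring
theorem valLE_pos (ds : List ℕ) (h : ds ≠ []) (h0 : ds.getLast? ≠ some 0) :
    0 < pvValLE ds := by
  induction ds with
  | nil => exact absurd rfl h
  | cons d rest ih =>
    cases rest with
    | nil =>
      simp only [List.getLast?_singleton, ne_eq, Option.some.injEq] at h0
      simp only [pvValLE]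
      omega
    | cons e t =>
      rw [List.getLast?_cons_cons] at h0
      have hrec := ih (by simp) h0
      rw [show pvValLE (d :: e :: t) = d + 10 * pvValLE (e :: t) from by rw [pvValLE]]
      omega

-- carry-addition correctness
theorem addCarry_nil (c : ℕ) : pvAddCarry [] c = pvNatLE c := by
  induction c using Nat.strong_induction_on with
  | _ c ih =>
    rw [pvAddCarry, pvNatLE]
    by_cases h : c = 0
    · simp [h]
    · rw [if_neg h, if_neg h, ih (c / 10) (Nat.div_lt_self (Nat.pos_of_ne_zero h) (by norm_num))]

theorem natLE_cons (n : ℕ) (h : 0 < n) : pvNatLE n = n % 10 :: pvNatLE (n / 10) := by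
  rw [pvNatLE, if_neg (by omega)]

theorem addCarry_eq (ls : List ℕ) (c : ℕ) (h : ∀ d ∈ ls, d < 10)
    (hc : ls.getLast? ≠ some 0) : pvAddCarry ls c = pvNatLE (pvValLE ls + c) := by
  induction ls generalizing c with
  | nil => simp only [pvValLE, Nat.zero_add]; exact addCarry_nil c
  | cons d rest ih =>
    rw [pvAddCarry]
    cases rest with
    | nil =>
      simp only [List.getLast?_singleton, ne_eq, Option.some.injEq] at hc
      have hval : pvValLE [d] + c = d + c := by simp [pvValLE]
      rw [hval, addCarry_nil, natLE_cons (d + c) (by omega)]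
    | cons e t =>
      rw [List.getLast?_cons_cons] at hc
      have hv : 0 < pvValLE (e :: t) := valLE_pos _ (by simp) hc
      have hstep : pvValLE (d :: e :: t) = d + 10 * pvValLE (e :: t) := by rw [pvValLE]
      rw [ih ((d + c) / 10) (fun x hx => h x (by simp [hx])) hc, hstep]
      set v := pvValLE (e :: t) with hvdef
      rw [natLE_cons (d + 10 * v + c) (by omega)]
      have hmod : (d + 10 * v + c) % 10 = (d + c) % 10 := by omega
      have hdiv : (d + 10 * v + c) / 10 = (d + c) / 10 + v := by omega
      rw [hmod, hdiv]
      congr 2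
      omega

theorem natLE_lt10 (n : ℕ) : ∀ d ∈ pvNatLE n, d < 10 := by
  induction n using Nat.strong_induction_on with
  | _ n ih =>
    rw [pvNatLE]
    by_cases h : n = 0
    · simp [h]
    · rw [if_neg h]
      intro d hd
      rcases List.mem_cons.mp hd with rfl | hm
      · omega
      · exact ih (n / 10) (Nat.div_lt_self (Nat.pos_of_ne_zero h) (by norm_num)) d hm

-- Nat.toDigits via canonical digits
theorem toDigitsCore_eq (f : ℕ) : ∀ (n : ℕ) (l : List Char), 0 < n → n < f →
    Nat.toDigitsCore 10 f n l = ((pvNatLE n).reverse).map Nat.digitChar ++ l := by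
  induction f with
  | zero => intro n l h0 hf; omega
  | succ f ih =>
    intro n l h0 hf
    rw [Nat.toDigitsCore]
    by_cases h10 : n / 10 = 0
    · simp only [h10, if_pos]
      rw [pvNatLE, if_neg (by omega), pvNatLE, h10, if_pos rfl]
      rfl
    · rw [if_neg h10]
      rw [ih (n / 10) (Nat.digitChar (n % 10) :: l) (Nat.pos_of_ne_zero h10) (by
        have h2 := Nat.div_lt_self h0 (show 1 < 10 by norm_num)
        omega)]
      rw [natLE_cons n h0, List.reverse_cons, List.map_append]
      simp

theorem toDigits_eq (m : ℕ) (h : 0 < m) :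
    Nat.toDigits 10 m = ((pvNatLE m).reverse).map Nat.digitChar := by
  rw [Nat.toDigits, toDigitsCore_eq (m + 1) m [] h (by omega), List.append_nil]

-- A's output loop is a flatMap
theorem enkrip_eq (cs : List Char) :
    cs.foldl (fun enk x => enk ++ ((PySem.List.pyGet? pvKey ((pvInt? [x]).getD 0)).getD "").toList) [] =
    cs.flatMap (fun x => ((PySem.List.pyGet? pvKey ((pvInt? [x]).getD 0)).getD "").toList) := by
  rw [PySem.List.foldl_append_eq_flatMap]
  rfl

-- assembly helpers
theorem chunkA_neg : pvChunkA (-1) = ['1', '-', '1'] := by decide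

theorem chunkA_of_find (ch : Char) (h0 : 0 ≤ pvFind ch) (hlt : (pvFind ch).toNat < 74) :
    pvChunkA (pvFind ch) = (pvChunkB (pvFind ch).toNat).map Nat.digitChar := by
  have h := (chunk_fin ⟨(pvFind ch).toNat, hlt⟩).1
  simpa [Int.toNat_of_nonneg h0] using h

theorem pvInt?_none (cs : List Char) (h : '-' ∈ cs) : pvInt? cs = none := by
  unfold pvInt?
  split
  · rfl
  · rw [parse_none cs h 0]
    rfl

theorem pvInt?_digits (ds : List ℕ) (hne : ds ≠ []) (h : ∀ d ∈ ds, d < 10) :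
    pvInt? (ds.map Nat.digitChar) = some ((pvValBE ds : ℕ) : ℤ) := by
  unfold pvInt?
  rw [if_neg (by simpa using hne)]
  rw [parse_digits ds h 0]
  rfl

theorem toChars_nat (m : ℕ) : PySem.Int.toChars ((m : ℕ) : ℤ) = Nat.toDigits 10 m := by
  unfold PySem.Int.toChars
  rw [if_neg (by omega)]
  simp

theorem outmap (bs : List ℕ) (h : ∀ d ∈ bs, d < 10) :
    (bs.map Nat.digitChar).flatMap
      (fun x => ((PySem.List.pyGet? pvKey ((pvInt? [x]).getD 0)).getD "").toList) =
    bs.flatMap (fun (d : ℕ) => ((PySem.List.pyGet? pvKey ((d : ℤ))).getD "").toList) := by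
  rw [List.flatMap_map]
  induction bs with
  | nil => rfl
  | cons d t ih =>
    simp only [List.flatMap_cons]
    rw [(digit_char_facts ⟨d, h d (by simp)⟩).2.2, ih (fun x hx => h x (by simp [hx]))]

theorem chunkB_ne_nil (n : ℕ) : pvChunkB n ≠ [] := by
  unfold pvChunkB
  split <;> simp

-- ===== VERDICT (by name: the statement is the Claim_ definition above) =====
set_option maxHeartbeats 1600000 in
theorem enPrima_spec : Claim_equal_enPrima := by
  intro p _dom
  show enPrima p = enPrima_alt p
  simp only [enPrima, enPrima_alt]
  rw [chipertext_eq]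
  by_cases hall : ∀ ch ∈ p.toList, 0 ≤ pvFind ch
  · rw [pvDigits_some _ hall]
    cases hl : p.toList with
    | nil => rfl
    | cons c0 rest =>
      have hall' : ∀ ch ∈ (c0 :: rest), 0 ≤ pvFind ch := hl ▸ hall
      have hlt74 : ∀ ch ∈ (c0 :: rest), (pvFind ch).toNat < 74 := by
        intro ch hm
        rcases find_cases ch with h | ⟨_, h⟩
        · exact absurd (h ▸ hall' ch hm) (by norm_num)
        · exact h
      set dsAll := (c0 :: rest).flatMap (fun ch => pvChunkB (pvFind ch).toNat) with hds
      have hlt10 : ∀ d ∈ dsAll, d < 10 := by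
        intro d hd
        obtain ⟨ch, hm, hmem⟩ := List.mem_flatMap.mp hd
        exact (chunk_fin ⟨(pvFind ch).toNat, hlt74 ch hm⟩).2 d hmem
      have hmap : (c0 :: rest).flatMap (fun ch => pvChunkA (pvFind ch)) = dsAll.map Nat.digitChar := by
        rw [hds, List.map_flatMap]
        exact List.flatMap_congr (fun ch hm => chunkA_of_find ch (hall' ch hm) (hlt74 ch hm))
      have hne : dsAll ≠ [] := by
        rw [hds]
        simp only [List.flatMap_cons]
        intro hcontra
        exact chunkB_ne_nil _ (List.append_eq_nil_iff.mp hcontra).1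
      rw [hmap, pvInt?_digits dsAll hne hlt10]
      obtain ⟨d0, ds', hcons⟩ := List.exists_cons_of_ne_nil hne
      rw [hcons]
      -- reduce both matches
      show String.ofList _ = String.ofList _
      congr 1
      rw [← hcons]
      set N := pvValBE dsAll + 173 with hN
      have hNpos : 0 < N := by omega
      have hcast : ((pvValBE dsAll : ℕ) : ℤ) + 173 = ((N : ℕ) : ℤ) := by omega
      rw [hcast, toChars_nat, enkrip_eq, toDigits_eq N hNpos]
      rw [outmap _ (fun d hd => natLE_lt10 N d (List.mem_reverse.mp hd))]
      -- B side
      have houtB : pvAddCarry (pvStripZeros dsAll).reverse 173 = pvNatLE N := by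
        rcases strip_head dsAll with hh | h0
        · rw [addCarry_eq _ 173
            (fun d hd => hlt10 d (strip_sub _ d (List.mem_reverse.mp hd)))
            (by rw [List.getLast?_reverse]; exact hh)]
          congr 1
          rw [← valBE_eq_valLE_reverse, strip_val, hN]
        · rw [h0]
          have hv0 : pvValBE dsAll = 0 := by
            rw [← strip_val dsAll, h0]
            rfl
          rw [hN, hv0]
          rw [show ([0] : List ℕ).reverse = [0] from rfl]
          rw [pvAddCarry, addCarry_nil]
          rw [natLE_cons (0 + 173) (by norm_num)]
      rw [houtB]
  · have hex : ∃ ch ∈ p.toList, pvFind ch < 0 := by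
      by_contra hno
      simp only [not_exists, not_and, not_lt] at hno
      exact hall (fun ch hm => hno ch hm)
    obtain ⟨ch, hm, hneg⟩ := hex
    rw [pvDigits_none _ ch hm hneg]
    have hfind : pvFind ch = -1 := by
      rcases find_cases ch with h | ⟨h, _⟩
      · exact h
      · omega
    have hmem : '-' ∈ (p.toList.flatMap fun c => pvChunkA (pvFind c)) :=
      List.mem_flatMap.mpr ⟨ch, hm, by rw [hfind, chunkA_neg]; simp⟩
    rw [pvInt?_none _ hmem]
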